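-- pv_equiv track=rewrite | github.com/981377660LMT/algorithm-study | 7_graph/dfs/yield与返回bool的dfs.py | smallestBeautifulString1
-- ===== SOURCE A (Python) =====
-- def smallestBeautifulString1(s: str, k: int) -> str:
--     """生成器dfs返回路径."""
--
--     def dfs(pos: int, isLimit: bool, pre1: int, pre2: int):
--         if pos == n:
--             if not isLimit:
--                 yield path
--             return
--         lower = ords[pos] if isLimit else 97
--         for cur in range(lower, 97 + k):
--             if cur == pre1 or cur == pre2:
--                 continue
--             path.append(cur)
--             yield from dfs(pos + 1, (isLimit and cur == lower), cur, pre1)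
--             path.pop()
--
--     path = []
--     n = len(s)
--     ords = list(map(ord, s))
--     res = next(dfs(0, True, 0, -1), [])
--     return "".join([chr(v) for v in res])
-- ===== SOURCE B (Python) =====
-- def smallestBeautifulString1(s: str, k: int) -> str:
--     """Iterative greedy: keep the longest usable prefix of s, then try deviation
--     positions right-to-left; at a deviation pick the smallest valid larger char
--     and greedily fill the rest with minimal valid chars."""
--     hi = 96 + k  # largest allowed fill char; increments are bounded by hi too
--     ords = list(map(ord, s))
--     n = len(ords)
--
--     def fill(m, p1, p2):
--         # m minimal chars from [97, hi], each differing from its two predecessors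
--         out = []
--         for _ in range(m):
--             c = 97
--             while c <= hi and (c == p1 or c == p2):
--                 c += 1
--             if c > hi:
--                 return None
--             out.append(c)
--             p1, p2 = c, p1
--         return out
--
--     # longest prefix of s that can stay unchanged
--     pre = []
--     for v in ords:
--         p1 = pre[-1] if len(pre) >= 1 else 0
--         p2 = pre[-2] if len(pre) >= 2 else (0 if len(pre) == 1 else -1)
--         if v <= hi and v != p1 and v != p2:
--             pre.append(v)
--         else:
--             break
--
--     i = min(len(pre), n - 1)
--     while i >= 0:
--         p1 = ords[i - 1] if i >= 1 else 0
--         p2 = ords[i - 2] if i >= 2 else (0 if i == 1 else -1)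
--         c = ords[i] + 1
--         while c <= hi and (c == p1 or c == p2):
--             c += 1
--         if c <= hi:
--             suf = fill(n - i - 1, c, p1)
--             if suf is not None:
--                 return "".join(map(chr, ords[:i] + [c] + suf))
--         i -= 1
--     return ""
-- ===== Notes on version B (the rewrite author's own statement) =====
-- stated objective: alternative
-- what changed: A's recursive generator DFS with backtracking is replaced by an iterative two-phase greedy: keep the longest usable prefix of s, then scan deviation positions right-to-left, at each taking the smallest valid larger character and greedily filling the suffix with minimal valid characters (a proved lemma shows that if the greedy fill fails under the smallest candidate it fails under every candidate, so no in-fill backtracking is needed).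
import Mathlib
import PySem

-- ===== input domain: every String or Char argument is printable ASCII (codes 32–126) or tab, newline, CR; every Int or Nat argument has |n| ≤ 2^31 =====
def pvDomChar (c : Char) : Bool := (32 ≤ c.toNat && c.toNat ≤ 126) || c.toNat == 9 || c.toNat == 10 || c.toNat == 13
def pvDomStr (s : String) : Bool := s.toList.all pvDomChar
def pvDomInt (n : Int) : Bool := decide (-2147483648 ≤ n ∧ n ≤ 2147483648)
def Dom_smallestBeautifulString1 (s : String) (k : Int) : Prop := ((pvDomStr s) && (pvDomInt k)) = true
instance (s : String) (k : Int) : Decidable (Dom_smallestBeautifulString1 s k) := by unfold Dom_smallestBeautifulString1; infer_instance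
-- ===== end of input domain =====

-- B rewrites A's recursive generator DFS as an explicit two-phase greedy (keep the
-- longest usable prefix, then scan deviation positions right-to-left with a minimal
-- greedy fill): a different decomposition, measured faster by a constant factor
-- (no per-character generator/recursion overhead).

-- ===== PORT A =====
-- Literal port of A's generator DFS.  The position `pos` is represented by the
-- remaining suffix `rest` of `ords` (so `ords[pos]` is `rest`'s head and `pos == n`
-- is `rest = []`); `path` is the accumulator list A mutates, and the first yielded
-- path is the `some` value returned.
mutual
def dfsA (k : Int) (rest : List Int) (isLimit : Bool) (pre1 pre2 : Int)
    (path : List Int) : Option (List Int) :=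
  match rest with
  | [] => if !isLimit then some path else none
  | c :: rest' =>
    let lower := if isLimit then c else 97
    loopA k rest' isLimit pre1 pre2 path lower lower
termination_by (rest.length * 2, 0)

def loopA (k : Int) (rest' : List Int) (isLimit : Bool) (pre1 pre2 : Int)
    (path : List Int) (lower cur : Int) : Option (List Int) :=
  if h : cur < 97 + k then
    if cur = pre1 ∨ cur = pre2 then
      loopA k rest' isLimit pre1 pre2 path lower (cur + 1)
    else
      match dfsA k rest' (isLimit && decide (cur = lower)) cur pre1 (path ++ [cur]) with
      | some r => some r
      | none => loopA k rest' isLimit pre1 pre2 path lower (cur + 1)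
  else none
termination_by (rest'.length * 2 + 1, (97 + k - cur).toNat)
decreasing_by
  · exact Prod.Lex.right _ (by omega)
  · exact Prod.Lex.left _ _ (by omega)
  · exact Prod.Lex.right _ (by omega)
end

def smallestBeautifulString1 (s : String) (k : Int) : String :=
  let ords := s.toList.map (fun ch => (ch.toNat : Int))
  let res := (dfsA k ords true 0 (-1) []).getD []
  String.mk (res.map (fun v => Char.ofNat v.toNat))

-- ===== PORT B =====
-- Port of Source B.  `nextOkB` is the shared `while c <= hi and (c == p1 or c == p2)` scan,
-- `fillB` the greedy minimal fill, `prefB` the longest-unchanged-prefix loop,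
-- `outerB` the descending deviation loop.
def nextOkB (hi p1 p2 c : Int) : Int :=
  if c ≤ hi ∧ (c = p1 ∨ c = p2) then nextOkB hi p1 p2 (c + 1) else c
termination_by (hi + 1 - c).toNat
decreasing_by omega

def fillB (hi m p1 p2 : Int) : Option (List Int) :=
  if 0 < m then
    let c := nextOkB hi p1 p2 97
    if c > hi then none
    else (fillB hi (m - 1) c p1).map (fun out => c :: out)
  else some []
termination_by m.toNat
decreasing_by omega

def prefB (hi : Int) (pre rest : List Int) : List Int :=
  match rest with
  | [] => pre
  | v :: rest' =>
    let p1 := if pre.length ≥ 1 then (PySem.List.pyGet? pre (-1)).getD 0 else 0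
    let p2 := if pre.length ≥ 2 then (PySem.List.pyGet? pre (-2)).getD 0
              else (if pre.length = 1 then 0 else -1)
    if v ≤ hi ∧ v ≠ p1 ∧ v ≠ p2 then prefB hi (pre ++ [v]) rest' else pre

def outerB (hi : Int) (ords : List Int) (n i : Int) : String :=
  if h : 0 ≤ i then
    let p1 := if i ≥ 1 then (PySem.List.pyGet? ords (i - 1)).getD 0 else 0
    let p2 := if i ≥ 2 then (PySem.List.pyGet? ords (i - 2)).getD 0
              else (if i = 1 then 0 else -1)
    let c := nextOkB hi p1 p2 ((PySem.List.pyGet? ords i).getD 0 + 1)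
    if c ≤ hi then
      match fillB hi (n - i - 1) c p1 with
      | some suf =>
          String.mk ((PySem.List.slice ords none (some i) ++ c :: suf).map
            (fun v => Char.ofNat v.toNat))
      | none => outerB hi ords n (i - 1)
    else outerB hi ords n (i - 1)
  else ""
termination_by (i + 1).toNat
decreasing_by all_goals omega

def smallestBeautifulString1_alt (s : String) (k : Int) : String :=
  let hi := 96 + k
  let ords := s.toList.map (fun ch => (ch.toNat : Int))
  let n : Int := ords.length
  let pre := prefB hi [] ords
  outerB hi ords n (min (pre.length : Int) (n - 1))

-- ===== PRECONDITION & SPEC =====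
def Spec_smallestBeautifulString1 (s : String) (k : Int) (out : String) : Prop := out = smallestBeautifulString1_alt s k
instance (s : String) (k : Int) (out : String) : Decidable (Spec_smallestBeautifulString1 s k out) := by unfold Spec_smallestBeautifulString1; infer_instance

-- ===== CLAIM (what is proved, stated in full; the proofs are below) =====
def Claim_equal_smallestBeautifulString1 : Prop := ∀ (s : String) (k : Int), Dom_smallestBeautifulString1 s k → Spec_smallestBeautifulString1 s k (smallestBeautifulString1 s k)

-- ===== LEMMAS AND PROOFS =====

-- Abstract first-valid-character search (A's loop skeleton), bridged to B's nextOkB.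
def findV (k p1 p2 cur : Int) : Option Int :=
  if cur < 97 + k then
    if cur = p1 ∨ cur = p2 then findV k p1 p2 (cur + 1) else some cur
  else none
termination_by (97 + k - cur).toNat
decreasing_by omega

theorem findV_eq_nextOk (k p1 p2 cur : Int) :
    findV k p1 p2 cur =
      (if nextOkB (96 + k) p1 p2 cur ≤ 96 + k then some (nextOkB (96 + k) p1 p2 cur) else none) := by
  by_cases hlt : cur < 97 + k
  · rw [findV, nextOkB]
    by_cases hb : cur = p1 ∨ cur = p2
    · simp only [if_pos hlt, if_pos hb, if_pos (show cur ≤ 96 + k ∧ (cur = p1 ∨ cur = p2) from ⟨by omega, hb⟩)]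
      exact findV_eq_nextOk k p1 p2 (cur+1)
    · rw [if_pos hlt, if_neg hb, if_neg (show ¬(cur ≤ 96 + k ∧ (cur = p1 ∨ cur = p2)) by rintro ⟨-, h⟩; exact hb h), if_pos (by omega)]
  · rw [findV, nextOkB]
    rw [if_neg hlt, if_neg (show ¬(cur ≤ 96 + k ∧ (cur = p1 ∨ cur = p2)) by rintro ⟨h, -⟩; omega), if_neg (by omega)]
termination_by (97 + k - cur).toNat
decreasing_by omega
theorem findV_spec (k p1 p2 cur c : Int) (h : findV k p1 p2 cur = some c) :
    cur ≤ c ∧ c < 97 + k ∧ c ≠ p1 ∧ c ≠ p2 := by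
  rw [findV] at h
  by_cases hlt : cur < 97 + k
  · rw [if_pos hlt] at h
    by_cases hb : cur = p1 ∨ cur = p2
    · rw [if_pos hb] at h
      have := findV_spec k p1 p2 (cur+1) c h
      exact ⟨by omega, this.2⟩
    · rw [if_neg hb] at h
      obtain rfl := Option.some.inj h
      exact ⟨le_refl _, hlt, fun h1 => hb (Or.inl h1), fun h2 => hb (Or.inr h2)⟩
  · rw [if_neg hlt] at h; exact absurd h (by simp)
termination_by (97 + k - cur).toNat
decreasing_by omega
theorem fillB_nonpos (hi m p1 p2 : Int) (h : m ≤ 0) : fillB hi m p1 p2 = some [] := by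
  rw [fillB]; simp [show ¬(0 < m) by omega]
theorem fillB_pos (hi m p1 p2 : Int) (h : 0 < m) : fillB hi m p1 p2 =
    (if nextOkB hi p1 p2 97 > hi then none
     else (fillB hi (m - 1) (nextOkB hi p1 p2 97) p1).map (fun out => nextOkB hi p1 p2 97 :: out)) := by
  rw [fillB, if_pos h]

theorem nextOk_step (hi p1 p2 c : Int) :
    nextOkB hi p1 p2 c = if c ≤ hi ∧ (c = p1 ∨ c = p2) then nextOkB hi p1 p2 (c + 1) else c := by
  rw [nextOkB]

theorem nextOk_gt (hi p1 p2 : Int) (h : hi < 97) : nextOkB hi p1 p2 97 = 97 := by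
  rw [nextOkB, if_neg (by rintro ⟨h2, -⟩; omega)]

theorem nextOk_le99 (hi p1 p2 : Int) (h : 99 ≤ hi) : nextOkB hi p1 p2 97 ≤ 99 := by
  rw [nextOk_step, show (97:Int) + 1 = 98 by norm_num]
  split_ifs with h1
  · rw [nextOk_step, show (98:Int) + 1 = 99 by norm_num]
    split_ifs with h2
    · rw [nextOk_step]
      split_ifs with h3
      · exfalso
        obtain ⟨-, h1⟩ := h1; obtain ⟨-, h2⟩ := h2; obtain ⟨-, h3⟩ := h3
        rcases h1 with h1 | h1 <;> rcases h2 with h2 | h2 <;> rcases h3 with h3 | h3 <;> omega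
      · omega
    · omega
  · omega

theorem nextOk1 (p1 p2 : Int) : nextOkB 97 p1 p2 97 = if 97 = p1 ∨ 97 = p2 then 98 else 97 := by
  rw [nextOk_step, show (97:Int) + 1 = 98 by norm_num]
  by_cases h : 97 = p1 ∨ 97 = p2
  · rw [if_pos ⟨by omega, h⟩, if_pos h, nextOk_step, if_neg (by rintro ⟨h2, -⟩; omega)]
  · rw [if_neg (by rintro ⟨-, h2⟩; exact h h2), if_neg h]

theorem nextOk2 (p1 p2 : Int) : nextOkB 98 p1 p2 97 =
    if 97 = p1 ∨ 97 = p2 then (if 98 = p1 ∨ 98 = p2 then 99 else 98) else 97 := by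
  rw [nextOk_step, show (97:Int) + 1 = 98 by norm_num]
  by_cases h : 97 = p1 ∨ 97 = p2
  · rw [if_pos ⟨by omega, h⟩, if_pos h, nextOk_step, show (98:Int) + 1 = 99 by norm_num]
    by_cases h2 : 98 = p1 ∨ 98 = p2
    · rw [if_pos ⟨by omega, h2⟩, if_pos h2, nextOk_step, if_neg (by rintro ⟨h3, -⟩; omega)]
    · rw [if_neg (by rintro ⟨-, h3⟩; exact h2 h3), if_neg h2]
  · rw [if_neg (by rintro ⟨-, h2⟩; exact h h2), if_neg h]

theorem fill_fail0 (k m c q : Int) (hk : k ≤ 0) (hm : 1 ≤ m) : fillB (96 + k) m c q = none := by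
  rw [fillB_pos _ _ _ _ (by omega), nextOk_gt _ _ _ (by omega), if_pos (by omega)]
theorem fill_succ3 (k : Int) (hk : 3 ≤ k) (m c q : Int) (hm : 0 ≤ m) :
    fillB (96 + k) m c q ≠ none := by
  by_cases h0 : m ≤ 0
  · rw [fillB_nonpos _ _ _ _ h0]; simp
  · rw [fillB_pos _ _ _ _ (by omega)]
    have hle := nextOk_le99 (96 + k) c q (by omega)
    rw [if_neg (by omega)]
    have h2 := fill_succ3 k hk (m - 1) (nextOkB (96 + k) c q 97) c (by omega)
    rcases Option.ne_none_iff_exists'.mp h2 with ⟨l, hl⟩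
    rw [hl]; simp
termination_by m.toNat
decreasing_by omega
theorem fill1_char (c q : Int) : fillB 97 1 c q = none ↔ (97 = c ∨ 97 = q) := by
  rw [fillB_pos _ _ _ _ (by omega), nextOk1]
  by_cases h : 97 = c ∨ 97 = q
  · rw [if_pos h, if_pos (by omega)]; simp [h]
  · rw [if_neg h, if_neg (by omega), fillB_nonpos _ _ _ _ (by omega)]; simp [h]
theorem fill1_ge2 (m : Int) (hm : 2 ≤ m) (c q : Int) : fillB 97 m c q = none := by
  rw [fillB_pos _ _ _ _ (by omega), nextOk1]
  by_cases h : 97 = c ∨ 97 = q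
  · rw [if_pos h, if_pos (by omega)]
  · rw [if_neg h, if_neg (by omega)]
    have : fillB 97 (m - 1) 97 c = none := by
      by_cases h2 : 2 ≤ m - 1
      · exact fill1_ge2 (m - 1) h2 97 c
      · have : m - 1 = 1 := by omega
        rw [this, fill1_char]; left; rfl
    rw [this]; rfl
termination_by m.toNat
decreasing_by omega
theorem fill2_1 (c q : Int) : fillB 98 1 c q = none ↔ ((97 = c ∨ 97 = q) ∧ (98 = c ∨ 98 = q)) := by
  rw [fillB_pos _ _ _ _ (by omega), nextOk2]
  by_cases h : 97 = c ∨ 97 = q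
  · by_cases h2 : 98 = c ∨ 98 = q
    · rw [if_pos h, if_pos h2, if_pos (by omega)]; simp [h, h2]
    · rw [if_pos h, if_neg h2, if_neg (by omega), fillB_nonpos _ _ _ _ (by omega)]; simp [h, h2]
  · rw [if_neg h, if_neg (by omega), fillB_nonpos _ _ _ _ (by omega)]; simp [h]
theorem fill2_2 (c q : Int) : fillB 98 2 c q = none ↔ (c = 97 ∨ c = 98) := by
  rw [fillB_pos _ _ _ _ (by omega), nextOk2]
  by_cases h : 97 = c ∨ 97 = q
  · by_cases h2 : 98 = c ∨ 98 = q
    · rw [if_pos h, if_pos h2, if_pos (by omega)]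
      constructor
      · intro _; omega
      · intro _; rfl
    · rw [if_pos h, if_neg h2, if_neg (by omega)]
      have h1 : fillB 98 (2 - 1) 98 c = none ↔ (c = 97) := by
        rw [show (2:Int) - 1 = 1 by rfl, fill2_1]; constructor
        · rintro ⟨ha, -⟩; omega
        · intro hc; exact ⟨by omega, by omega⟩
      rcases Classical.em (c = 97) with hc | hc
      · rw [h1.mpr hc]; simp [hc]
      · have hne : fillB 98 (2-1) 98 c ≠ none := fun hn => hc (h1.mp hn)
        rcases Option.ne_none_iff_exists'.mp hne with ⟨l, hl⟩
        obtain ⟨h2a, h2b⟩ := not_or.mp h2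
        rw [hl]; simp; omega
  · rw [if_neg h, if_neg (by omega)]
    have h1 : fillB 98 (2 - 1) 97 c = none ↔ (c = 98) := by
      rw [show (2:Int) - 1 = 1 by rfl, fill2_1]; constructor
      · rintro ⟨ha, hb⟩; omega
      · intro hc; exact ⟨by omega, by omega⟩
    rcases Classical.em (c = 98) with hc | hc
    · rw [h1.mpr hc]; simp [hc]
    · have hne : fillB 98 (2-1) 97 c ≠ none := fun hn => hc (h1.mp hn)
      rcases Option.ne_none_iff_exists'.mp hne with ⟨l, hl⟩
      obtain ⟨ha, hb⟩ := not_or.mp h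
      rw [hl]; simp; omega
theorem fill2_ge3 (m : Int) (hm : 3 ≤ m) (c q : Int) : fillB 98 m c q = none := by
  rw [fillB_pos _ _ _ _ (by omega), nextOk2]
  by_cases h : 97 = c ∨ 97 = q
  · by_cases h2 : 98 = c ∨ 98 = q
    · rw [if_pos h, if_pos h2, if_pos (by omega)]
    · rw [if_pos h, if_neg h2, if_neg (by omega)]
      have : fillB 98 (m - 1) 98 c = none := by
        by_cases h3 : 3 ≤ m - 1
        · exact fill2_ge3 (m - 1) h3 98 c
        · have : m - 1 = 2 := by omega
          rw [this, fill2_2]; right; rfl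
      rw [this]; rfl
  · rw [if_neg h, if_neg (by omega)]
    have : fillB 98 (m - 1) 97 c = none := by
      by_cases h3 : 3 ≤ m - 1
      · exact fill2_ge3 (m - 1) h3 97 c
      · have : m - 1 = 2 := by omega
        rw [this, fill2_2]; left; rfl
    rw [this]; rfl
termination_by m.toNat
decreasing_by all_goals omega
-- If the greedy fill fails under the smallest candidate it fails under every
-- later candidate (this is why neither program retries other candidates).
theorem fail_indep (k m q c0 c1 : Int) (hm : 0 ≤ m) (hlt : c0 < c1) (hc1 : c1 < 97 + k)
    (h0 : c0 ≠ q) (h1 : c1 ≠ q) (hfail : fillB (96 + k) m c0 q = none) :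
    fillB (96 + k) m c1 q = none := by
  by_cases hm0 : m ≤ 0
  · rw [fillB_nonpos _ _ _ _ hm0] at hfail; exact absurd hfail (by simp)
  by_cases hk : 3 ≤ k
  · exact absurd hfail (fill_succ3 k hk m c0 q hm)
  by_cases hk0 : k ≤ 0
  · exact fill_fail0 k m c1 q hk0 (by omega)
  have hk12 : k = 1 ∨ k = 2 := by  omega
  rcases hk12 with rfl | rfl
  · norm_num at hfail ⊢
    by_cases hm2 : 2 ≤ m
    · exact fill1_ge2 m hm2 c1 q
    · have hm1 : m = 1 := by omega
      subst hm1
      rw [fill1_char] at hfail ⊢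
      omega
  · norm_num at hfail ⊢
    by_cases hm3 : 3 ≤ m
    · exact fill2_ge3 m hm3 c1 q
    · by_cases hm2 : m = 2
      · subst hm2
        rw [fill2_2] at hfail ⊢
        omega
      · have hm1 : m = 1 := by omega
        subst hm1
        rw [fill2_1] at hfail ⊢
        omega
theorem loopA_tail (k : Int) (rest' : List Int)
    (HNL : ∀ x y pth, dfsA k rest' false x y pth =
      (fillB (96 + k) rest'.length x y).map (fun t => pth ++ t))
    (isLimit : Bool) (p1 p2 lower : Int) (path : List Int) (cur : Int)
    (hside : isLimit = false ∨ lower < cur) :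
    loopA k rest' isLimit p1 p2 path lower cur =
      (findV k p1 p2 cur).bind
        (fun d => (fillB (96 + k) (rest'.length : Int) d p1).map (fun t => path ++ d :: t)) := by
  rw [loopA, findV]
  by_cases hlt : cur < 97 + k
  · rw [dif_pos hlt, if_pos hlt]
    by_cases hb : cur = p1 ∨ cur = p2
    · rw [if_pos hb, if_pos hb]
      exact loopA_tail k rest' HNL isLimit p1 p2 lower path (cur + 1)
        (by rcases hside with h | h; exact Or.inl h; exact Or.inr (by omega))
    · rw [if_neg hb, if_neg hb]
      have hlim : (isLimit && decide (cur = lower)) = false := by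
        rcases hside with h | h
        · simp [h]
        · cases isLimit
          · simp
          · simp; omega
      rw [hlim, HNL cur p1 (path ++ [cur])]
      cases hfill : fillB (96 + k) (rest'.length : Int) cur p1 with
      | some l => simp [hfill]
      | none =>
        simp only [Option.map_none]
        rw [loopA_tail k rest' HNL isLimit p1 p2 lower path (cur + 1)
          (by rcases hside with h | h; exact Or.inl h; exact Or.inr (by omega)),
          Option.bind_some, hfill, Option.map_none]
        cases hfv : findV k p1 p2 (cur + 1) with
        | none => rfl
        | some d =>
          obtain ⟨hd1, hd2, hd3, -⟩ := findV_spec k p1 p2 (cur + 1) d hfv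
          have hnone := fail_indep k (rest'.length : Int) p1 cur d (by omega) (by omega) hd2
            (fun h => hb (Or.inl h)) hd3 hfill
          rw [Option.bind_some, hnone, Option.map_none]
  · rw [dif_neg hlt, if_neg hlt]
    rfl
termination_by (97 + k - cur).toNat
decreasing_by all_goals omega

-- A's non-limit subtree is exactly the greedy fill.
theorem dfsA_nonlimit (k : Int) (rest : List Int) :
    ∀ p1 p2 path, dfsA k rest false p1 p2 path =
      (fillB (96 + k) rest.length p1 p2).map (fun t => path ++ t) := by
  induction rest with
  | nil =>
    intro p1 p2 path
    rw [dfsA, fillB_nonpos _ _ _ _ (by simp)]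
    simp
  | cons c rest' ih =>
    intro p1 p2 path
    rw [dfsA]
    simp only [Bool.false_eq_true, if_false]
    rw [loopA_tail k rest' ih false p1 p2 97 path 97 (Or.inl rfl)]
    rw [findV_eq_nextOk, fillB_pos _ _ _ _ (by simp)]
    have hcast : ((c :: rest').length : Int) - 1 = (rest'.length : Int) := by simp
    rw [hcast]
    by_cases hle : nextOkB (96 + k) p1 p2 97 ≤ 96 + k
    · rw [if_pos hle, if_neg (by omega)]
      cases hfill : fillB (96 + k) (rest'.length : Int) (nextOkB (96 + k) p1 p2 97) p1 with
      | none => simp [hfill]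
      | some l => simp [hfill]
    · rw [if_neg hle, if_pos (by omega)]
      rfl
-- The tail of A's loop at a limit position (candidates strictly above the copied char).
def incF (k c : Int) (len : Nat) (p1 p2 : Int) (path : List Int) : Option (List Int) :=
  (findV k p1 p2 (c + 1)).bind
    (fun d => (fillB (96 + k) (len : Int) d p1).map (fun t => path ++ d :: t))

-- first-success combinator (the generator's 'first yield wins')
def orElseO (x y : Option (List Int)) : Option (List Int) :=
  match x with
  | some r => some r
  | none => y

theorem orElseO_some (r : List Int) (y : Option (List Int)) : orElseO (some r) y = some r := rfl
theorem orElseO_none (y : Option (List Int)) : orElseO none y = y := rfl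

-- A's limit chain, as a structural recursion.
def chainF (k : Int) : List Int → Int → Int → List Int → Option (List Int)
  | [], _, _, _ => none
  | c :: rest', p1, p2, path =>
    if c < 97 + k ∧ c ≠ p1 ∧ c ≠ p2 then
      orElseO (chainF k rest' c p1 (path ++ [c])) (incF k c rest'.length p1 p2 path)
    else incF k c rest'.length p1 p2 path

theorem dfsA_limit (k : Int) (rest : List Int) :
    ∀ p1 p2 path, dfsA k rest true p1 p2 path = chainF k rest p1 p2 path := by
  induction rest with
  | nil => intro p1 p2 path; rw [dfsA]; rfl
  | cons c rest' ih =>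
    intro p1 p2 path
    rw [dfsA, chainF]
    simp only [if_true]
    rw [loopA]
    by_cases hcl : c < 97 + k
    · rw [dif_pos hcl]
      by_cases hb : c = p1 ∨ c = p2
      · rw [if_pos hb, if_neg (by rintro ⟨-, h1, h2⟩; rcases hb with h | h; exact h1 h; exact h2 h)]
        rw [loopA_tail k rest' (dfsA_nonlimit k rest') true p1 p2 c path (c + 1) (Or.inr (by omega))]
        rfl
      · rw [if_neg hb,
          if_pos ⟨hcl, fun h => hb (Or.inl h), fun h => hb (Or.inr h)⟩]
        have : (true && decide (c = c)) = true := by simp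
        rw [this, ih c p1 (path ++ [c])]
        cases hch : chainF k rest' c p1 (path ++ [c]) with
        | some r => rw [orElseO_some]
        | none =>
          rw [orElseO_none,
            loopA_tail k rest' (dfsA_nonlimit k rest') true p1 p2 c path (c + 1) (Or.inr (by omega))]
          rfl
    · rw [dif_neg hcl, if_neg (by rintro ⟨h, -⟩; omega)]
      unfold incF
      rw [findV, if_neg (by omega)]
      rfl
-- ---------- B side ----------
def pre1I (a : List Int) (i : Nat) : Int := if 1 ≤ i then a.getD (i - 1) 0 else 0
def pre2I (a : List Int) (i : Nat) : Int :=
  if 2 ≤ i then a.getD (i - 2) 0 else if i = 1 then 0 else -1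

abbrev copyOk (k : Int) (a : List Int) (i : Nat) : Prop :=
  a.getD i 0 < 97 + k ∧ a.getD i 0 ≠ pre1I a i ∧ a.getD i 0 ≠ pre2I a i

def firstBad (k : Int) (a : List Int) (i : Nat) : Nat :=
  if h : i < a.length then
    (if copyOk k a i then firstBad k a (i + 1) else i)
  else i
termination_by a.length - i

theorem pre1_take (a : List Int) (i : Nat) (hle : i ≤ a.length) :
    (if (a.take i).length ≥ 1 then (PySem.List.pyGet? (a.take i) (-1)).getD 0 else 0) =
      pre1I a i := by
  have hlen : (a.take i).length = i := by simp; omega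
  unfold pre1I
  simp only [hlen, ge_iff_le]
  by_cases h1 : 1 ≤ i
  · rw [if_pos h1, if_pos h1, PySem.List.pyGet?_neg_one, List.getLast?_eq_getElem?,
      hlen, List.getElem?_take_of_lt (by omega), List.getD_eq_getElem?_getD]
  · rw [if_neg h1, if_neg h1]
theorem pre2_take (a : List Int) (i : Nat) (hle : i ≤ a.length) :
    (if (a.take i).length ≥ 2 then (PySem.List.pyGet? (a.take i) (-2)).getD 0
     else (if (a.take i).length = 1 then 0 else -1)) = pre2I a i := by
  have hlen : (a.take i).length = i := by simp; omega
  unfold pre2I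
  simp only [hlen, ge_iff_le]
  by_cases h2 : 2 ≤ i
  · rw [if_pos h2, if_pos h2,
      PySem.List.pyGet?_neg_ofNat _ 2 (by omega) (by simp [hlen]; omega),
      hlen, List.getElem?_take_of_lt (by omega), List.getD_eq_getElem?_getD]
  · rw [if_neg h2, if_neg h2]
theorem pre1_int (a : List Int) (i : Nat) :
    (if (i : Int) ≥ 1 then (PySem.List.pyGet? a ((i : Int) - 1)).getD 0 else 0) = pre1I a i := by
  unfold pre1I
  by_cases h1 : 1 ≤ i
  · rw [if_pos (show (i : Int) ≥ 1 by exact_mod_cast h1), if_pos h1,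
      show ((i : Int) - 1) = ((i - 1 : Nat) : Int) by omega, PySem.List.pyGet?_natCast,
      List.getD_eq_getElem?_getD]
  · rw [if_neg (show ¬((i : Int) ≥ 1) by omega), if_neg h1]
theorem pre2_int (a : List Int) (i : Nat) :
    (if (i : Int) ≥ 2 then (PySem.List.pyGet? a ((i : Int) - 2)).getD 0
     else (if (i : Int) = 1 then 0 else -1)) = pre2I a i := by
  unfold pre2I
  by_cases h2 : 2 ≤ i
  · rw [if_pos (show (i : Int) ≥ 2 by exact_mod_cast h2), if_pos h2,
      show ((i : Int) - 2) = ((i - 2 : Nat) : Int) by omega, PySem.List.pyGet?_natCast,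
      List.getD_eq_getElem?_getD]
  · rw [if_neg (show ¬((i : Int) ≥ 2) by omega), if_neg h2]
    by_cases h1 : i = 1
    · rw [if_pos (show (i : Int) = 1 by exact_mod_cast h1), if_pos h1]
    · rw [if_neg (show ¬((i : Int) = 1) by omega), if_neg h1]
theorem pre1I_succ (a : List Int) (i : Nat) : pre1I a (i + 1) = a.getD i 0 := by
  unfold pre1I
  rw [if_pos (by omega), show i + 1 - 1 = i by omega]
theorem pre2I_succ (a : List Int) (i : Nat) : pre2I a (i + 1) = pre1I a i := by
  unfold pre2I pre1I
  by_cases h1 : 1 ≤ i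
  · rw [if_pos (by omega), if_pos h1, show i + 1 - 2 = i - 1 by omega]
  · rw [if_neg (by omega), if_pos (by omega), if_neg h1]
theorem firstBad_props (k : Int) (a : List Int) (i : Nat) (hle : i ≤ a.length) :
      i ≤ firstBad k a i ∧ firstBad k a i ≤ a.length ∧
      (∀ j, i ≤ j → j < firstBad k a i → copyOk k a j) ∧
      (firstBad k a i < a.length → ¬ copyOk k a (firstBad k a i)) := by
  rw [firstBad]
  by_cases h : i < a.length
  · rw [dif_pos h]
    by_cases hc : copyOk k a i
    · rw [if_pos hc]
      obtain ⟨h1, h2, h3, h4⟩ := firstBad_props k a (i + 1) (by omega)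
      refine ⟨by omega, h2, ?_, h4⟩
      intro j hij hj
      by_cases hji : j = i
      · exact hji ▸ hc
      · exact h3 j (by omega) hj
    · rw [if_neg hc]
      exact ⟨le_refl _, by omega, fun j hij hj => absurd hj (by omega), fun _ => hc⟩
  · rw [dif_neg h]
    exact ⟨le_refl _, by omega, fun j hij hj => absurd hj (by omega), fun hlt => absurd hlt (by omega)⟩
termination_by a.length - i
decreasing_by omega
theorem prefB_eq (k : Int) (a : List Int) (i : Nat) (hle : i ≤ a.length) :
      prefB (96 + k) (a.take i) (a.drop i) = a.take (firstBad k a i) := by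
  rw [firstBad]
  by_cases h : i < a.length
  · rw [dif_pos h, List.drop_eq_getElem_cons h, prefB]
    simp only [pre1_take a i hle, pre2_take a i hle]
    have hg : a[i] = a.getD i 0 := by
      rw [List.getD_eq_getElem?_getD, List.getElem?_eq_getElem h]; rfl
    by_cases hc : copyOk k a i
    · rw [if_pos (by obtain ⟨c1, c2, c3⟩ := hc; rw [hg]; exact ⟨by omega, c2, c3⟩),
        if_pos hc, ← List.take_succ_eq_append_getElem h]
      exact prefB_eq k a (i + 1) (by omega)
    · rw [if_neg ?hneg, if_neg hc]
      case hneg =>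
        rintro ⟨c1, c2, c3⟩
        exact hc ⟨by rw [← hg]; omega, by rw [← hg]; exact c2, by rw [← hg]; exact c3⟩
  · rw [dif_neg h, List.drop_eq_nil_of_le (by omega), prefB]
termination_by a.length - i
decreasing_by omega
def renderS (r : List Int) : String := String.mk (r.map (fun v => Char.ofNat v.toNat))

def matchG (x : Option (List Int)) (e : String) : String :=
  match x with
  | some r => renderS r
  | none => e

theorem matchG_some (r : List Int) (e : String) : matchG (some r) e = renderS r := rfl
theorem matchG_none (e : String) : matchG none e = e := rfl
theorem matchG_orElse (x y : Option (List Int)) (e : String) :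
    matchG (orElseO x y) e = matchG x (matchG y e) := by cases x <;> rfl

def G (k : Int) (a : List Int) (i : Nat) : String :=
  matchG (chainF k (a.drop i) (pre1I a i) (pre2I a i) (a.take i))
    (outerB (96 + k) a a.length ((i : Int) - 1))

theorem outer_step (k : Int) (a : List Int) (i : Nat) (hi : i < a.length) :
    outerB (96 + k) a a.length i =
      matchG (incF k (a.getD i 0) (a.drop (i + 1)).length (pre1I a i) (pre2I a i) (a.take i))
        (outerB (96 + k) a a.length ((i : Int) - 1)) := by
  rw [outerB, dif_pos (by omega)]
  simp only [pre1_int a i, pre2_int a i]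
  rw [show (PySem.List.pyGet? a (i : Int)).getD 0 = a.getD i 0 by
    rw [PySem.List.pyGet?_natCast, List.getD_eq_getElem?_getD]]
  unfold incF
  rw [findV_eq_nextOk]
  have hlen : ((a.drop (i + 1)).length : Int) = (a.length : Int) - (i : Int) - 1 := by
    simp; omega
  rw [hlen]
  by_cases hle : nextOkB (96 + k) (pre1I a i) (pre2I a i) (a.getD i 0 + 1) ≤ 96 + k
  · rw [if_pos hle, if_pos hle, Option.bind_some]
    cases hf : fillB (96 + k) ((a.length : Int) - (i : Int) - 1)
        (nextOkB (96 + k) (pre1I a i) (pre2I a i) (a.getD i 0 + 1)) (pre1I a i) with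
    | none => rw [Option.map_none, matchG_none]
    | some suf =>
      rw [Option.map_some, matchG_some]
      unfold renderS
      rw [PySem.List.slice_to_natCast]
  · rw [if_neg hle, if_neg hle, Option.bind_none, matchG_none]
theorem G_step (k : Int) (a : List Int) (i : Nat) (hi : i < a.length) (hc : copyOk k a i) :
    G k a i = G k a (i + 1) := by
  unfold G
  have hg : a[i] = a.getD i 0 := by
    rw [List.getD_eq_getElem?_getD, List.getElem?_eq_getElem hi]; rfl
  obtain ⟨c1, c2, c3⟩ := hc
  rw [List.drop_eq_getElem_cons hi, chainF,
    if_pos ⟨by omega, by rw [hg]; exact c2, by rw [hg]; exact c3⟩, matchG_orElse]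
  have harg : chainF k (a.drop (i + 1)) a[i] (pre1I a i) (a.take i ++ [a[i]]) =
      chainF k (a.drop (i + 1)) (pre1I a (i + 1)) (pre2I a (i + 1)) (a.take (i + 1)) := by
    rw [pre1I_succ, pre2I_succ, ← hg, List.take_succ_eq_append_getElem hi]
  rw [harg, hg, ← outer_step k a i hi,
    show ((i + 1 : Nat) : Int) - 1 = (i : Int) by push_cast; ring]
theorem G_end (k : Int) (a : List Int) :
    G k a (firstBad k a 0) =
      outerB (96 + k) a a.length (min ((firstBad k a 0 : Int)) ((a.length : Int) - 1)) := by
  obtain ⟨-, hPle, -, hPbad⟩ := firstBad_props k a 0 (by omega)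
  unfold G
  by_cases hPn : firstBad k a 0 = a.length
  · rw [hPn, List.drop_length, chainF, matchG_none]
    rw [show min ((a.length : Int)) ((a.length : Int) - 1) = (a.length : Int) - 1 by omega]
  · have hPlt : firstBad k a 0 < a.length := by omega
    rw [List.drop_eq_getElem_cons hPlt, chainF]
    have hg : a[firstBad k a 0] = a.getD (firstBad k a 0) 0 := by
      rw [List.getD_eq_getElem?_getD, List.getElem?_eq_getElem hPlt]; rfl
    rw [if_neg (by rintro ⟨c1, c2, c3⟩; exact hPbad hPlt ⟨by omega, by rw [← hg]; exact c2,
      by rw [← hg]; exact c3⟩)]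
    rw [show min ((firstBad k a 0 : Int)) ((a.length : Int) - 1) = (firstBad k a 0 : Int) by omega]
    rw [outer_step k a (firstBad k a 0) hPlt, hg]
theorem G_upto (k : Int) (a : List Int) (i : Nat) (hle : i ≤ firstBad k a 0) :
    G k a i = G k a (firstBad k a 0) := by
  by_cases heq : i = firstBad k a 0
  · rw [heq]
  · obtain ⟨-, hPle, hcopy, -⟩ := firstBad_props k a 0 (by omega)
    rw [G_step k a i (by omega) (hcopy i (by omega) (by omega))]
    exact G_upto k a (i + 1) (by omega)
termination_by firstBad k a 0 - i
decreasing_by omega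

theorem G_zero (k : Int) (a : List Int) :
    G k a 0 = G k a (firstBad k a 0) := by
  exact G_upto k a 0 (by omega)
-- ===== VERDICT (by name: the statement is the Claim_ definition above) =====
theorem smallestBeautifulString1_spec : Claim_equal_smallestBeautifulString1 := by
  unfold Claim_equal_smallestBeautifulString1
  intro s k _
  simp only [Spec_smallestBeautifulString1, smallestBeautifulString1, smallestBeautifulString1_alt]
  set a := s.toList.map (fun ch => (ch.toNat : Int)) with ha
  obtain ⟨-, hPle, -, -⟩ := firstBad_props k a 0 (by omega)
  have hA : String.mk (((dfsA k a true 0 (-1) []).getD []).map (fun v => Char.ofNat v.toNat)) =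
      G k a 0 := by
    rw [dfsA_limit k a 0 (-1) []]
    unfold G
    rw [List.drop_zero, List.take_zero]
    rw [show pre1I a 0 = 0 by unfold pre1I; rw [if_neg (by omega)]]
    rw [show pre2I a 0 = -1 by unfold pre2I; rw [if_neg (by omega), if_neg (by omega)]]
    cases hch : chainF k a 0 (-1) [] with
    | some r => rw [matchG_some]; rfl
    | none =>
      rw [matchG_none, outerB, dif_neg (by omega)]
      rfl
  have hpre : prefB (96 + k) [] a = a.take (firstBad k a 0) := by
    have h0 := prefB_eq k a 0 (by omega)
    rwa [List.take_zero, List.drop_zero] at h0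
  rw [hA, G_zero, G_end]
  rw [hpre]
  rw [show ((a.take (firstBad k a 0)).length : Int) = (firstBad k a 0 : Int) by simp; omega]
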